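-- pv_equiv track=rewrite | github.com/GasnierGabriel/NSI | GASNIER_Gabriel_Pyramide.py | get_width_last_mini_floor
-- ===== SOURCE A (Python) =====
-- def get_new_augmentation_var_values(width_augmentation_avancement : int, width_augmentation_moment : int, width_augmentation : int) -> tuple:
--     width_augmentation_avancement = 0
--     width_augmentation_moment += 2
--     width_augmentation += 2
--     return (width_augmentation_avancement, width_augmentation_moment, width_augmentation)
--
-- def get_width_last_mini_floor(n : int) -> int:  #calculate the width of the last mini floor of the pyramide
--     width_floor, width_mini_floor, width_augmentation, width_augmentation_moment, width_augmentation_avancement = 3, 3, 6, 3, 1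
--     for i in range(n):
--         for j in range(width_floor-1):
--             width_mini_floor += 2
--         if i == n-1:
--             return width_mini_floor
--         if width_augmentation_avancement == width_augmentation_moment:
--             width_augmentation_avancement, width_augmentation_moment, width_augmentation = get_new_augmentation_var_values(width_augmentation_avancement, width_augmentation_moment, width_augmentation)
--         width_mini_floor, width_floor, width_augmentation_avancement = (width_augmentation+ width_mini_floor, width_floor+1, width_augmentation_avancement+1)
--     return width_mini_floor
-- ===== SOURCE B (Python) =====
-- def get_width_last_mini_floor(n : int) -> int:
--     # Single pass: the inner counting loop of A is replaced by an arithmetic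
--     # step 2*(i+2) (the floor width at step i is i+3).
--     if n <= 0:
--         return 3
--     mini, aug, moment, av = 3, 6, 3, 1
--     for i in range(n - 1):
--         mini += 2 * (i + 2)
--         if av == moment:
--             av, moment, aug = 0, moment + 2, aug + 2
--         mini += aug
--         av += 1
--     return mini + 2 * (n + 1)
-- ===== Notes on version B (the rewrite author's own statement) =====
-- stated objective: faster
-- what changed: B drops the inner counting loop, adding each floor's contribution with one arithmetic addition per outer step, and hoists the early return out of the loop, giving a single linear pass.
import Mathlib
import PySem

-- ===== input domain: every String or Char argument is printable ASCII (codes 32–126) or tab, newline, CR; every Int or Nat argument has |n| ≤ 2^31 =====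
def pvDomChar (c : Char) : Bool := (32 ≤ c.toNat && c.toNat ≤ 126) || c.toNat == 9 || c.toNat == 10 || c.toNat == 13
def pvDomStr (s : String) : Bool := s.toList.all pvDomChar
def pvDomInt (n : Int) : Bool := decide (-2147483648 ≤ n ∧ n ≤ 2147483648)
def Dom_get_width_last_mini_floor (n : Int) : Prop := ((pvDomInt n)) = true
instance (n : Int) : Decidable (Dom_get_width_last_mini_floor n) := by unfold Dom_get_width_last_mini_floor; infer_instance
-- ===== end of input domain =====

-- B replaces A's inner counting loop by one arithmetic addition per floor, turning the quadratic scan into a single linear pass (objective: faster).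

-- ===== PORT A =====
def get_new_augmentation_var_values (width_augmentation_avancement : Int) (width_augmentation_moment : Int) (width_augmentation : Int) : Int × Int × Int :=
  (0, width_augmentation_moment + 2, width_augmentation + 2)

-- the for-loop over range(n) with an early `return` is modelled with a Sum accumulator (.inl = returned)
def get_width_last_mini_floor (n : Int) : Int :=
  let r := (PySem.List.pyRange 0 n 1).foldl
    (fun (acc : Int ⊕ (Int × Int × Int × Int × Int)) i =>
      match acc with
      | .inl v => .inl v
      | .inr (wf, wmf, wa, wam, waa) =>
        let wmf := (PySem.List.pyRange 0 (wf - 1) 1).foldl (fun m _ => m + 2) wmf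
        if i = n - 1 then .inl wmf
        else
          let t := if waa = wam then get_new_augmentation_var_values waa wam wa else (waa, wam, wa)
          .inr (wf + 1, t.2.2 + wmf, t.2.2, t.2.1, t.1 + 1))
    (.inr (3, 3, 6, 3, 1))
  match r with
  | .inl v => v
  | .inr (_, wmf, _, _, _) => wmf

-- ===== PORT B =====
def get_width_last_mini_floor_alt (n : Int) : Int :=
  if n ≤ 0 then 3
  else
    let st := (PySem.List.pyRange 0 (n - 1) 1).foldl
      (fun (st : Int × Int × Int × Int) i =>
        let mini := st.1 + 2 * (i + 2)
        let t := if st.2.2.2 = st.2.2.1 then (0, st.2.2.1 + 2, st.2.1 + 2) else (st.2.2.2, st.2.2.1, st.2.1)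
        (mini + t.2.2, t.2.2, t.2.1, t.1 + 1))
      (3, 6, 3, 1)
    st.1 + 2 * (n + 1)

-- ===== PRECONDITION & SPEC =====
def Spec_get_width_last_mini_floor (n : Int) (out : Int) : Prop := out = get_width_last_mini_floor_alt n
instance (n : Int) (out : Int) : Decidable (Spec_get_width_last_mini_floor n out) := by unfold Spec_get_width_last_mini_floor; infer_instance

-- ===== CLAIM (what is proved, stated in full; the proofs are below) =====
def Claim_equal_get_width_last_mini_floor : Prop := ∀ (n : Int), Dom_get_width_last_mini_floor n → Spec_get_width_last_mini_floor n (get_width_last_mini_floor n)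

-- ===== LEMMAS AND PROOFS =====

-- A's outer-loop body with the early return stripped (used only on indices i ≠ n-1)
def pvAstep (s : Int × Int × Int × Int × Int) (i : Int) : Int × Int × Int × Int × Int :=
  match s with
  | (wf, wmf, wa, wam, waa) =>
    let wmf := (PySem.List.pyRange 0 (wf - 1) 1).foldl (fun m _ => m + 2) wmf
    let t := if waa = wam then get_new_augmentation_var_values waa wam wa else (waa, wam, wa)
    (wf + 1, t.2.2 + wmf, t.2.2, t.2.1, t.1 + 1)

def pvBstep (st : Int × Int × Int × Int) (i : Int) : Int × Int × Int × Int :=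
  let mini := st.1 + 2 * (i + 2)
  let t := if st.2.2.2 = st.2.2.1 then (0, st.2.2.1 + 2, st.2.1 + 2) else (st.2.2.2, st.2.2.1, st.2.1)
  (mini + t.2.2, t.2.2, t.2.1, t.1 + 1)

lemma pv_foldl_add_two (l : List Int) (x : Int) :
    l.foldl (fun m _ => m + 2) x = x + 2 * l.length := by
  induction l generalizing x with
  | nil => simp
  | cons a l ih => simp [List.foldl_cons, ih]; ring

lemma pv_inner (k x : Int) (hk : 0 ≤ k) :
    (PySem.List.pyRange 0 k 1).foldl (fun m _ => m + 2) x = x + 2 * k := by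
  rw [pv_foldl_add_two, PySem.List.length_pyRange_one]
  have : ((k - 0).toNat : Int) = k := by omega
  rw [this]

-- the fold with early return equals the pure fold while no index hits n-1
lemma pv_no_return (n : Int) (l : List Int) (hl : ∀ i ∈ l, i ≠ n - 1)
    (s : Int × Int × Int × Int × Int) :
    l.foldl
      (fun (acc : Int ⊕ (Int × Int × Int × Int × Int)) i =>
        match acc with
        | .inl v => .inl v
        | .inr (wf, wmf, wa, wam, waa) =>
          let wmf := (PySem.List.pyRange 0 (wf - 1) 1).foldl (fun m _ => m + 2) wmf
          if i = n - 1 then .inl wmf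
          else
            let t := if waa = wam then get_new_augmentation_var_values waa wam wa else (waa, wam, wa)
            .inr (wf + 1, t.2.2 + wmf, t.2.2, t.2.1, t.1 + 1))
      (.inr s) = .inr (l.foldl pvAstep s) := by
  induction l generalizing s with
  | nil => rfl
  | cons a l ih =>
    obtain ⟨wf, wmf, wa, wam, waa⟩ := s
    have ha : a ≠ n - 1 := hl a (by simp)
    simp only [List.foldl_cons, if_neg ha]
    exact ih (fun i hi => hl i (by simp [hi])) _

-- invariant: A's pure state after the first m iterations is (3+m, B's state)
lemma pv_inv (m : Nat) :
    (PySem.List.pyRange 0 m 1).foldl pvAstep (3, 3, 6, 3, 1)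
      = ((3 + m : Int),
         ((PySem.List.pyRange 0 m 1).foldl pvBstep (3, 6, 3, 1)).1,
         ((PySem.List.pyRange 0 m 1).foldl pvBstep (3, 6, 3, 1)).2.1,
         ((PySem.List.pyRange 0 m 1).foldl pvBstep (3, 6, 3, 1)).2.2.1,
         ((PySem.List.pyRange 0 m 1).foldl pvBstep (3, 6, 3, 1)).2.2.2) := by
  induction m with
  | zero => simp
  | succ m ih =>
    have hsplit : PySem.List.pyRange 0 ((m : Int) + 1) 1
        = PySem.List.pyRange 0 m 1 ++ [(m : Int)] :=
      PySem.List.pyRange_one_succ_right (by positivity)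
    push_cast
    rw [hsplit, List.foldl_append, List.foldl_append, ih]
    obtain ⟨mini, aug, mo, av⟩ := (PySem.List.pyRange 0 (m : Int) 1).foldl pvBstep (3, 6, 3, 1)
    simp only [List.foldl_cons, List.foldl_nil, pvAstep, pvBstep, get_new_augmentation_var_values]
    rw [pv_inner _ _ (by omega)]
    simp only [Prod.mk.injEq]
    and_intros <;> first | trivial | ring

-- ===== VERDICT (by name: the statement is the Claim_ definition above) =====
theorem get_width_last_mini_floor_spec : Claim_equal_get_width_last_mini_floor := by
  intro n _
  unfold Spec_get_width_last_mini_floor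
  by_cases hn : n ≤ 0
  · unfold get_width_last_mini_floor get_width_last_mini_floor_alt
    rw [PySem.List.pyRange_one_eq_nil (by omega)]
    simp [hn]
  · have halt : get_width_last_mini_floor_alt n
        = ((PySem.List.pyRange 0 (n - 1) 1).foldl pvBstep (3, 6, 3, 1)).1 + 2 * (n + 1) := by
      simp only [get_width_last_mini_floor_alt, if_neg hn]; rfl
    rw [halt]
    unfold get_width_last_mini_floor
    have hsplit : PySem.List.pyRange 0 n 1
        = PySem.List.pyRange 0 (n - 1) 1 ++ [n - 1] := by
      have := PySem.List.pyRange_one_succ_right (a := 0) (b := n - 1) (by omega)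
      simpa [sub_add_cancel] using this
    rw [hsplit, List.foldl_append]
    rw [pv_no_return n _ (fun i hi => by
      have := (PySem.List.mem_pyRange_one).1 hi; omega)]
    have hm : (n - 1 : Int) = ((n - 1).toNat : Nat) := by omega
    rw [hm, pv_inv]
    obtain ⟨mini, aug, mo, av⟩ :=
      (PySem.List.pyRange 0 ((n - 1).toNat : Int) 1).foldl pvBstep (3, 6, 3, 1)
    simp only [List.foldl_cons, List.foldl_nil]
    rw [pv_inner _ _ (by omega)]
    have h3 : (3 + ((n - 1).toNat : Int) - 1) = n + 1 := by omega
    rw [h3]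
    simp
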